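-- pv_equiv track=rewrite | github.com/jiahao0525/- | 最大N个数与最小N个数的和.py | calculate_sum_of_extremes
-- ===== SOURCE A (Python) =====
-- def calculate_sum_of_extremes(array, N):
--     # 检查N是否有效
--     if N <= 0:
--         return -1
--
--     unique_numbers = set()
--
--     # 检查数组中的每个数并去重
--     for num in array:
--         if num < 0 or num > 1000:
--             return -1
--         unique_numbers.add(num)
--
--     # 如果去重后的数字数量不足2N个，则返回-1
--     if len(unique_numbers) < N * 2:
--         return -1
--
--     # 将去重后的数字排序
--     sorted_numbers = sorted(unique_numbers)
--
--     smallest_sum = sum(sorted_numbers[:N])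
--     largest_sum = sum(sorted_numbers[-N:])
--
--     # 检查最小N个数和最大N个数是否重叠
--     if sorted_numbers[N-1] >= sorted_numbers[-N]:
--         return -1
--
--     # 返回最大N个数与最小N个数的和
--     return smallest_sum + largest_sum
-- ===== SOURCE B (Python) =====
-- def calculate_sum_of_extremes(array, N):
--     if N <= 0:
--         return -1
--     present = [False] * 1001
--     for num in array:
--         if num < 0 or num > 1000:
--             return -1
--         present[num] = True
--     if sum(present) < 2 * N:
--         return -1
--     total = 0
--     k = 0
--     for v in range(1001):
--         if present[v]:
--             total += v
--             k += 1
--             if k == N: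
--                 break
--     k = 0
--     for v in range(1000, -1, -1):
--         if present[v]:
--             total += v
--             k += 1
--             if k == N:
--                 break
--     return total
-- ===== Notes on version B (the rewrite author's own statement) =====
-- stated objective: alternative
-- what changed: Replaces the set+sorted approach with a counting-sort-style boolean presence array over the value range 0..1000, summing the N smallest/largest distinct values by an upward and a downward bucket scan; A's dead overlap check disappears.
import Mathlib
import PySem

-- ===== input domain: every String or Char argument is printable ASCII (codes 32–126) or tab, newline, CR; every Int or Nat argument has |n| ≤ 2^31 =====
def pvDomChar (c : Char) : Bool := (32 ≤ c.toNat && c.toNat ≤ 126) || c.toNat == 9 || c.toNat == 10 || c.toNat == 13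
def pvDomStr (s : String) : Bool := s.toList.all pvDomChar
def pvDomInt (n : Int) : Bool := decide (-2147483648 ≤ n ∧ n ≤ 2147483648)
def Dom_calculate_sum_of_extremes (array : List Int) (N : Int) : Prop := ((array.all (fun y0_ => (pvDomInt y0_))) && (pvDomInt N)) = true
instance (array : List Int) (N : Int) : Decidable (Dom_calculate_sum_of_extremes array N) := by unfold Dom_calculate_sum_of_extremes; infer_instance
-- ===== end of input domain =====

-- B replaces A's set+sorted computation by a boolean presence array over 0..1000
-- with an upward and a downward bucket scan (alternative algorithm, same cost class).

-- ===== PORT A =====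
-- the 'for num in array' loop: early return -1 is modelled as 'none'
def pvA_loop : List Int → PySem.Set Int → Option (PySem.Set Int)
  | [], s => some s
  | num :: rest, s =>
    if num < 0 ∨ num > 1000 then none else pvA_loop rest (PySem.Set.add s num)

def calculate_sum_of_extremes (array : List Int) (N : Int) : Int :=
  if N ≤ 0 then -1 else
  match pvA_loop array PySem.Set.empty with
  | none => -1
  | some unique_numbers =>
    if PySem.Set.len unique_numbers < N * 2 then -1 else
    let sorted_numbers := PySem.List.sorted unique_numbers (fun x => x) false
    let smallest_sum := (PySem.List.slice sorted_numbers none (some N)).sum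
    let largest_sum := (PySem.List.slice sorted_numbers (some (-N)) none).sum
    -- the two indexings below are always in range here (len ≥ 2N, N ≥ 1),
    -- so pyGetD's default 0 is never used and the port is exact
    if PySem.List.pyGetD sorted_numbers (N - 1) 0 ≥ PySem.List.pyGetD sorted_numbers (-N) 0
    then -1 else smallest_sum + largest_sum

-- ===== PORT B =====
-- the marking loop of Source B: early return -1 is modelled as 'none'
def pvB_mark : List Int → List Bool → Option (List Bool)
  | [], p => some p
  | num :: rest, p =>
    if num < 0 ∨ num > 1000 then none else pvB_mark rest (PySem.List.pySetD p num true)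

-- one directional bucket scan of Source B ('for v in …: if present[v]: … if k == N: break')
def pvB_collect (p : List Bool) (N : Int) : List Nat → Int → Int → Int
  | [], total, _k => total
  | v :: rest, total, k =>
    if p.getD v false then
      if k + 1 = N then total + (v : Int)
      else pvB_collect p N rest (total + (v : Int)) (k + 1)
    else pvB_collect p N rest total k

def calculate_sum_of_extremes_alt (array : List Int) (N : Int) : Int :=
  if N ≤ 0 then -1 else
  match pvB_mark array (List.replicate 1001 false) with
  | none => -1
  | some present =>
    if (present.countP (fun b => b) : Int) < 2 * N then -1 else
    pvB_collect present N (List.range 1001).reverse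
      (pvB_collect present N (List.range 1001) 0 0) 0

-- ===== PRECONDITION & SPEC =====
def Spec_calculate_sum_of_extremes (array : List Int) (N : Int) (out : Int) : Prop := out = calculate_sum_of_extremes_alt array N
instance (array : List Int) (N : Int) (out : Int) : Decidable (Spec_calculate_sum_of_extremes array N out) := by unfold Spec_calculate_sum_of_extremes; infer_instance

-- ===== CLAIM (what is proved, stated in full; the proofs are below) =====
def Claim_equal_calculate_sum_of_extremes : Prop := ∀ (array : List Int) (N : Int), Dom_calculate_sum_of_extremes array N → Spec_calculate_sum_of_extremes array N (calculate_sum_of_extremes array N)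

-- ===== LEMMAS AND PROOFS =====

def pvInRange (n : Int) : Bool := decide (0 ≤ n) && decide (n ≤ 1000)

lemma pvA_loop_eq (l : List Int) (s : PySem.Set Int) :
    pvA_loop l s = if l.all pvInRange then some (l.foldl PySem.Set.add s) else none := by
  induction l generalizing s with
  | nil => simp [pvA_loop]
  | cons n rest ih =>
    simp only [pvA_loop, List.all_cons, List.foldl_cons]
    by_cases h : n < 0 ∨ n > 1000
    · have h2 : pvInRange n = false := by simp [pvInRange]; omega
      simp [h, h2]
    · have h2 : pvInRange n = true := by simp [pvInRange]; omega
      simp [h, h2, ih]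

lemma pvB_mark_eq (l : List Int) (p : List Bool) :
    pvB_mark l p = if l.all pvInRange
      then some (l.foldl (fun p n => PySem.List.pySetD p n true) p) else none := by
  induction l generalizing p with
  | nil => simp [pvB_mark]
  | cons n rest ih =>
    simp only [pvB_mark, List.all_cons, List.foldl_cons]
    by_cases h : n < 0 ∨ n > 1000
    · have h2 : pvInRange n = false := by simp [pvInRange]; omega
      simp [h, h2]
    · have h2 : pvInRange n = true := by simp [pvInRange]; omega
      simp [h, h2, ih]

lemma pvMark_length (l : List Int) (p : List Bool) :
    (l.foldl (fun p n => PySem.List.pySetD p n true) p).length = p.length := by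
  induction l generalizing p with
  | nil => rfl
  | cons n rest ih => simp [List.foldl_cons, ih, PySem.List.length_pySetD]

lemma pvMark_getD (l : List Int) (p : List Bool) (hl : l.all pvInRange = true)
    (hp : p.length = 1001) (v : Nat) :
    (l.foldl (fun p n => PySem.List.pySetD p n true) p).getD v false
      = (p.getD v false || decide ((v : Int) ∈ l)) := by
  induction l generalizing p with
  | nil => simp
  | cons n rest ih =>
    simp only [List.all_cons, Bool.and_eq_true] at hl
    have hn : 0 ≤ n ∧ n ≤ 1000 := by
      have := hl.1; simp [pvInRange] at this; omega
    simp only [List.foldl_cons]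
    rw [PySem.List.pySetD_of_nonneg p true hn.1]
    rw [ih _ hl.2 (by simp [hp])]
    have hlt : n.toNat < p.length := by omega
    by_cases hv : v = n.toNat
    · subst hv
      have : (p.set n.toNat true).getD n.toNat false = true := by
        rw [List.getD_eq_getElem _ _ (by simpa using hlt)]
        simp
      rw [this]
      have hmem : ((n.toNat : Int) ∈ n :: rest) := by
        have : (n.toNat : Int) = n := by omega
        rw [this]; exact List.mem_cons_self
      rw [Bool.true_or, decide_eq_true hmem, Bool.or_true]
    · have : (p.set n.toNat true).getD v false = p.getD v false := by
        by_cases hvr : v < p.length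
        · rw [List.getD_eq_getElem _ _ (by simpa using hvr), List.getD_eq_getElem _ _ hvr]
          simp [Ne.symm hv]
        · rw [List.getD_eq_default _ _ (by simpa using (not_lt.mp hvr)),
              List.getD_eq_default _ _ (not_lt.mp hvr)]
      rw [this]
      have hne : ¬ ((v : Int) = n) := by omega
      have : decide ((v : Int) ∈ n :: rest) = decide ((v : Int) ∈ rest) := by
        simp [List.mem_cons, hne]
      rw [this]

lemma pvPresent_eq (array : List Int) (h : array.all pvInRange = true) :
    array.foldl (fun p n => PySem.List.pySetD p n true) (List.replicate 1001 false)
      = (List.range 1001).map (fun v : Nat => decide ((v : Int) ∈ array)) := by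
  apply List.ext_getElem
  · rw [pvMark_length, List.length_replicate, List.length_map, List.length_range]
  · intro v h1 h2
    have hv : v < 1001 := by rw [List.length_map, List.length_range] at h2; exact h2
    have h1' : v < (array.foldl (fun p n => PySem.List.pySetD p n true) (List.replicate 1001 false)).length := h1
    rw [← List.getD_eq_getElem _ false h1', pvMark_getD array _ h List.length_replicate v]
    rw [List.getD_eq_getElem _ _ (by rw [List.length_replicate]; exact hv), List.getElem_replicate,
      Bool.false_or, List.getElem_map, List.getElem_range]

lemma pvSorted_eq (array : List Int) (h : array.all pvInRange = true) :
    PySem.List.sorted (PySem.Set.ofList array) (fun x => x) false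
      = ((List.range 1001).filter (fun v : Nat => decide ((v : Int) ∈ array))).map (fun v : Nat => (v : Int)) := by
  apply PySem.List.sorted_eq_of_perm_of_pairwise_lt
  · rw [List.perm_ext_iff_of_nodup]
    · intro a
      simp only [List.mem_map, List.mem_filter, List.mem_range, PySem.Set.mem_ofList,
        decide_eq_true_eq]
      constructor
      · rintro ⟨v, ⟨_, hm⟩, rfl⟩; exact hm
      · intro ha
        have hr : 0 ≤ a ∧ a ≤ 1000 := by
          have := (List.all_eq_true.mp h) a ha
          simp [pvInRange] at this; omega
        have h0 : ((a.toNat : Int)) = a := Int.toNat_of_nonneg hr.1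
        exact ⟨a.toNat, ⟨by omega, by rw [h0]; exact ha⟩, h0⟩
    · exact ((List.nodup_range).filter _).map Nat.cast_injective
    · exact PySem.Set.nodup_ofList array
  · refine List.Pairwise.map _ (fun a b hab => ?_) (List.Pairwise.filter _ (List.pairwise_lt_range))
    exact_mod_cast hab

lemma pvCollect_eq (p : List Bool) (N : Int) (idxs : List Nat) (total : Int) (k : Int)
    (hk : k < N) (hlen : N - k ≤ (idxs.filter (fun v => p.getD v false)).length) :
    pvB_collect p N idxs total k
      = total + (((idxs.filter (fun v => p.getD v false)).take (N - k).toNat).map (fun v : Nat => (v : Int))).sum := by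
  induction idxs generalizing total k with
  | nil => simp at hlen; omega
  | cons v rest ih =>
    by_cases hp : p.getD v false
    · simp only [pvB_collect, hp, if_true, List.filter_cons]
      by_cases hN : k + 1 = N
      · have : (N - k).toNat = 1 := by omega
        simp [hN, this]
      · have hk1 : k + 1 < N := by
          rcases lt_or_eq_of_le (by omega : k + 1 ≤ N) with h | h
          · exact h
          · exact absurd h hN
        have hlen1 : N - (k+1) ≤ ((rest.filter (fun v => p.getD v false)).length : Int) := by
          simp only [List.filter_cons, hp] at hlen
          simp at hlen ⊢; omega
        rw [if_neg hN, ih _ _ hk1 hlen1]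
        have : (N - k).toNat = (N - (k+1)).toNat + 1 := by omega
        simp [this, List.take_succ_cons]
        ring
    · simp only [pvB_collect, hp, List.filter_cons]
      have hlen1 : N - k ≤ ((rest.filter (fun v => p.getD v false)).length : Int) := by
        simp only [List.filter_cons, hp] at hlen
        simpa using hlen
      rw [ih _ _ hk hlen1]
      simp

lemma pvL_pairwise (array : List Int) :
    (((List.range 1001).filter (fun v : Nat => decide ((v : Int) ∈ array))).map (fun v : Nat => (v : Int))).Pairwise (· < ·) := by
  refine List.Pairwise.map _ (fun a b hab => ?_) (List.Pairwise.filter _ (List.pairwise_lt_range))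
  exact_mod_cast hab

lemma pvFilter_P (array : List Int) :
    (List.range 1001).filter
        (fun v => (((List.range 1001).map (fun v : Nat => decide ((v : Int) ∈ array))).getD v false))
      = (List.range 1001).filter (fun v : Nat => decide ((v : Int) ∈ array)) := by
  refine List.filter_congr (fun v hv => ?_)
  have hv' : v < 1001 := List.mem_range.mp hv
  rw [List.getD_eq_getElem _ _ (by rw [List.length_map, List.length_range]; exact hv'),
    List.getElem_map, List.getElem_range]


-- ===== VERDICT (by name: the statement is the Claim_ definition above) =====
theorem calculate_sum_of_extremes_spec : Claim_equal_calculate_sum_of_extremes := by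
  intro array N _hdom
  unfold Spec_calculate_sum_of_extremes
  unfold calculate_sum_of_extremes calculate_sum_of_extremes_alt
  by_cases hN : N ≤ 0
  · simp [hN]
  rw [if_neg hN, if_neg hN, pvA_loop_eq, pvB_mark_eq]
  by_cases hall : array.all pvInRange
  · rw [if_pos hall, if_pos hall]
    have hof : array.foldl PySem.Set.add PySem.Set.empty = PySem.Set.ofList array := rfl
    rw [hof, pvPresent_eq array hall]
    set Lnat := (List.range 1001).filter (fun v : Nat => decide ((v : Int) ∈ array)) with hLnat
    set L := Lnat.map (fun v : Nat => (v : Int)) with hL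
    have hcount : (((List.range 1001).map (fun v : Nat => decide ((v : Int) ∈ array))).countP (fun b => b)) = Lnat.length := by
      rw [List.countP_map]
      rw [show ((fun b => b) ∘ (fun v : Nat => decide ((v : Int) ∈ array))) = (fun v : Nat => decide ((v : Int) ∈ array)) from rfl]
      rw [← List.countP_eq_length_filter]
    have hsort : PySem.List.sorted (PySem.Set.ofList array) (fun x => x) false = L := pvSorted_eq array hall
    have hlen : PySem.Set.len (PySem.Set.ofList array) = (Lnat.length : Int) := by
      have hperm : L.Perm (PySem.Set.ofList array) := by
        rw [← hsort]; exact PySem.List.sorted_perm _ _ _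
      have := hperm.length_eq
      simp only [hL, List.length_map] at this
      show ((PySem.Set.ofList array).length : Int) = _
      rw [← this]
    simp only []
    rw [hcount, hlen]
    have hguard : ((Lnat.length : Int) < N * 2) ↔ ((Lnat.length : Int) < 2 * N) := by omega
    by_cases hsmall : (Lnat.length : Int) < N * 2
    · rw [if_pos hsmall, if_pos (hguard.mp hsmall)]
    rw [if_neg hsmall, if_neg (fun h => hsmall (hguard.mpr h))]
    simp only [hsort]
    -- notation
    set n := N.toNat with hn
    have hnN : (n : Int) = N := by omega
    have h1n : 1 ≤ n := by omega
    have h2n : 2 * n ≤ Lnat.length := by omega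
    have hLlen : L.length = Lnat.length := by rw [hL, List.length_map]
    -- A's pieces
    have hsliceTo : PySem.List.slice L none (some N) = L.take n := by
      rw [PySem.List.slice_to L (by omega)]
    have hsliceFrom : PySem.List.slice L (some (-N)) none = L.drop (L.length - n) := by
      rw [← hnN, PySem.List.slice_from_neg_natCast L n (by omega)]
    have hidx1 : PySem.List.pyGetD L (N - 1) 0 = L[n - 1]'(by omega) := by
      rw [show (N - 1 : Int) = ((n - 1 : Nat) : Int) by omega, PySem.List.pyGetD_natCast,
        List.getD_eq_getElem _ _ (by omega)]
    have hidx2 : PySem.List.pyGetD L (-N) 0 = L[L.length - n]'(by omega) := by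
      have h := PySem.List.pyGetD_neg_natCast L n 0 (by omega) (by omega)
      rw [hnN] at h
      exact h
    have hpair : L.Pairwise (· < ·) := by rw [hL, hLnat]; exact pvL_pairwise array
    have hlt : L[n - 1]'(by omega) < L[L.length - n]'(by omega) :=
      (List.pairwise_iff_getElem.mp hpair) _ _ (by omega) (by omega) (by omega)
    rw [hidx1, hidx2, if_neg (not_le.mpr hlt), hsliceTo, hsliceFrom]
    -- B's pieces
    have hfilter := pvFilter_P array
    have hup : pvB_collect ((List.range 1001).map (fun v : Nat => decide ((v : Int) ∈ array))) N (List.range 1001) 0 0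
        = (L.take n).sum := by
      rw [pvCollect_eq _ _ _ _ _ (by omega) (by rw [hfilter, ← hLnat]; omega)]
      rw [hfilter]
      simp only [hL, ← List.map_take]
      rw [show (N - 0).toNat = n by omega, zero_add]
    have hdownfilter : (List.range 1001).reverse.filter
        (fun v => (((List.range 1001).map (fun v : Nat => decide ((v : Int) ∈ array))).getD v false))
        = Lnat.reverse := by
      rw [List.filter_reverse, hfilter]
    have hdown : pvB_collect ((List.range 1001).map (fun v : Nat => decide ((v : Int) ∈ array))) N (List.range 1001).reverse ((L.take n).sum) 0
        = (L.take n).sum + (L.drop (L.length - n)).sum := by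
      rw [pvCollect_eq _ _ _ _ _ (by omega) (by rw [hdownfilter]; simp only [List.length_reverse]; omega)]
      rw [hdownfilter, show (N - 0).toNat = n by omega]
      have hsum : ((Lnat.reverse.take n).map (fun v : Nat => (v : Int))).sum
          = (L.drop (L.length - n)).sum := by
        rw [List.take_reverse, List.map_reverse, List.sum_reverse, hL, ← List.map_drop, hLlen]
      rw [hsum]
    rw [hup, hdown]
  · rw [if_neg hall, if_neg hall]
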